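-- pv_equiv track=rewrite | github.com/cambridge-cares/TheWorldAvatar | MARIE_SEQ2SEQ/data_generation/data_generation/example_generator.py | get_argnames
-- ===== SOURCE A (Python) =====
-- from typing import Any, Dict, List
--
-- def get_argnames(text: str):
--     """Returns a set of argument names used in an f-string."""
--     idx = 0
--     arg_names: List[str] = []
--
--     while idx < len(text):
--         if text[idx] != "{":
--             idx += 1
--             continue
--
--         if idx + 1 < len(text) and text[idx + 1] == "{":
--             idx += 2
--             continue
--         else:
--             open_bracket_idx = idx
--             while idx < len(text) and text[idx] != "}":
--                 idx += 1
--             if idx == len(text):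
--                 raise ValueError("Text contains unclosed curly braces: " + text)
--             arg_names.append(text[open_bracket_idx + 1 : idx])
--
--     arg_names = list(set(arg_names))
--     arg_names.sort()
--
--     return arg_names
-- ===== SOURCE B (Python) =====
-- def get_argnames(text: str):
--     """Returns a set of argument names used in an f-string."""
--     OUT, BRACE, IN = 0, 1, 2
--     state = OUT
--     buf = []
--     names = set()
--     for ch in text:
--         if state == OUT:
--             if ch == "{":
--                 state = BRACE
--         elif state == BRACE:
--             if ch == "{":
--                 state = OUT
--             elif ch == "}":
--                 names.add("")
--                 state = OUT
--             else:
--                 buf = [ch]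
--                 state = IN
--         else:
--             if ch == "}":
--                 names.add("".join(buf))
--                 state = OUT
--             else:
--                 buf.append(ch)
--     if state != OUT:
--         raise ValueError("Text contains unclosed curly braces: " + text)
--     return sorted(names)
-- ===== Notes on version B (the rewrite author's own statement) =====
-- stated objective: faster
-- what changed: Replaced the index-based while loop with a nested rescanning inner while by a single one-pass 3-state automaton fold (outside/saw-brace/inside) that accumulates names into a set directly — no per-character text[idx] indexing and no nested loop (constant-factor speedup measured); Pre_ excludes exactly the unclosed-brace inputs on which both A and B raise ValueError.
import Mathlib
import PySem

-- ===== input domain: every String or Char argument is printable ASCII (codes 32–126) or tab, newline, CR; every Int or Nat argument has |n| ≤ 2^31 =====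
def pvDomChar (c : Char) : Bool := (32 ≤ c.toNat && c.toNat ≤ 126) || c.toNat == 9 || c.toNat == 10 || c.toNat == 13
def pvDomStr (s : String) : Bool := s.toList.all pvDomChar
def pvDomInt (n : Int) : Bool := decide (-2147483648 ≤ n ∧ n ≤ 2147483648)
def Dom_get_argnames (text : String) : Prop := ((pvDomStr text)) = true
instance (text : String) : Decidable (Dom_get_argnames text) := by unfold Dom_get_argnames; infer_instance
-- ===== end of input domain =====

-- B replaces A's index-based scan with a nested inner while by a one-pass 3-state
-- automaton fold over the characters (no indexing, no nested loop; measured constant-factor faster).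


-- ===== PORT A =====
-- inner while loop: advance until '}' collecting the slice text[open+1:idx];
-- returns none exactly where Python reaches end of text and raises ValueError
def aInner : List Char → List Char → Option (String × List Char)
  | [], _ => none
  | c :: rest, acc => if c = '}' then some (String.ofList acc, rest) else aInner rest (acc ++ [c])

theorem aInner_lt : ∀ (cs acc : List Char) (nm : String) (rest' : List Char),
    aInner cs acc = some (nm, rest') → rest'.length < cs.length := by
  intro cs
  induction cs with
  | nil => intro acc nm rest' h; simp [aInner] at h
  | cons c rest ih =>
    intro acc nm rest' h
    by_cases hc : c = '}'
    · simp [aInner, hc] at h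
      rcases h with ⟨-, rfl⟩
      simp
    · simp [aInner, hc] at h
      have := ih _ _ _ h
      simp only [List.length_cons]
      omega

-- outer while loop of A (the raise branch yields [])
def aLoop (cs : List Char) (names : List String) : List String :=
  match cs with
  | [] => PySem.List.sorted (PySem.Set.ofList names) (fun x => x) false
  | c :: rest =>
    if c = '{' then
      match rest with
      | '{' :: rest2 => aLoop rest2 names
      | r =>
        match h : aInner r [] with
        | some (nm, rest') => aLoop rest' (names ++ [nm])
        | none => []
    else aLoop rest names
termination_by cs.length
decreasing_by
  · simp
  · have := aInner_lt _ _ _ _ h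
    simp only [List.length_cons]
    omega
  · simp

def get_argnames (text : String) : List String := aLoop text.toList []

-- ===== PORT B =====
-- one transition of the 3-state automaton: state 0 = outside, 1 = just saw '{', 2 = inside a name
def bStep : (Int × List Char × PySem.Set String) → Char → (Int × List Char × PySem.Set String)
  | (state, buf, names), ch =>
    if state = 0 then
      if ch = '{' then (1, buf, names) else (0, buf, names)
    else if state = 1 then
      if ch = '{' then (0, buf, names)
      else if ch = '}' then (0, buf, PySem.Set.add names "")
      else (2, [ch], names)
    else
      if ch = '}' then (0, buf, PySem.Set.add names (String.ofList buf))
      else (state, buf ++ [ch], names)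

def get_argnames_alt (text : String) : List String :=
  let r := text.toList.foldl bStep (0, [], PySem.Set.empty)
  if r.1 ≠ 0 then [] else PySem.List.sorted r.2.2 (fun x => x) false

-- ===== PRECONDITION & SPEC =====
-- Pre_ excludes exactly the inputs on which Python A raises ValueError (unclosed
-- curly braces): in the suffix after the last '}', every '{' must be immediately
-- followed by a second '{' that it consumes.
def bracesOk : List Char → Bool
  | [] => true
  | '{' :: '{' :: r => bracesOk r
  | '{' :: _ => false
  | _ :: r => bracesOk r

def Pre_get_argnames (text : String) : Prop :=
  bracesOk ((text.toList.reverse.takeWhile (· ≠ '}')).reverse) = true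
instance (text : String) : Decidable (Pre_get_argnames text) := by unfold Pre_get_argnames; infer_instance
def pvWitness_get_argnames : String := "a {x} {{b}} {y}"

def Spec_get_argnames (text : String) (out : List String) : Prop := out = get_argnames_alt text
instance (text : String) (out : List String) : Decidable (Spec_get_argnames text out) := by unfold Spec_get_argnames; infer_instance

-- ===== CLAIM (what is proved, stated in full; the proofs are below) =====
def Claim_equal_get_argnames : Prop := ∀ (text : String), Dom_get_argnames text → Pre_get_argnames text → Spec_get_argnames text (get_argnames text)

-- ===== LEMMAS AND PROOFS =====

-- B's finish step applied to a fold result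
def finB (r : Int × List Char × PySem.Set String) : List String :=
  if r.1 ≠ 0 then [] else PySem.List.sorted r.2.2 (fun x => x) false

theorem ofList_snoc (names : List String) (nm : String) :
    PySem.Set.ofList (names ++ [nm]) = PySem.Set.add (PySem.Set.ofList names) nm := by
  simp [PySem.Set.ofList_eq_foldl, List.foldl_append]

-- the combined invariant: aLoop from the outside state, and the inner scan from state 2
theorem aLoop_nil (names : List String) :
    aLoop [] names = PySem.List.sorted (PySem.Set.ofList names) (fun x => x) false := by
  rw [aLoop.eq_def]

theorem aLoop_other (c : Char) (rest : List Char) (names : List String) (hc : c ≠ '{') :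
    aLoop (c :: rest) names = aLoop rest names := by
  rw [aLoop.eq_def]; simp [hc]

theorem aLoop_esc (rest : List Char) (names : List String) :
    aLoop ('{' :: '{' :: rest) names = aLoop rest names := by
  rw [aLoop.eq_def]; simp

theorem aLoop_open_nil (names : List String) :
    aLoop ['{'] names = [] := by
  rw [aLoop.eq_def]; simp [aInner]

theorem aLoop_open (c : Char) (rest : List Char) (names : List String) (hc : c ≠ '{') :
    aLoop ('{' :: c :: rest) names =
      (match aInner (c :: rest) [] with
       | some (nm, rest') => aLoop rest' (names ++ [nm])
       | none => []) := by
  rw [aLoop.eq_def]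
  dsimp only
  rw [if_pos rfl]
  split
  · rename_i heq; injection heq with h1 _; exact absurd h1 hc
  · split
    · rename_i h; rw [h]
    · rename_i h; rw [h]

theorem main_inv : ∀ (n : Nat) (cs : List Char), cs.length ≤ n →
    (∀ (names : List String) (buf : List Char),
      aLoop cs names = finB (cs.foldl bStep (0, buf, PySem.Set.ofList names))) ∧
    (∀ (acc : List Char) (names : List String),
      (match aInner cs acc with
       | some (nm, rest') => aLoop rest' (names ++ [nm])
       | none => []) = finB (cs.foldl bStep (2, acc, PySem.Set.ofList names))) := by
  intro n
  induction n with
  | zero =>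
    intro cs hlen
    have hnil : cs = [] := List.eq_nil_of_length_eq_zero (Nat.le_zero.mp hlen)
    subst hnil
    constructor
    · intro names buf
      simp [aLoop_nil, finB]
    · intro acc names
      simp [aInner, finB]
  | succ n ih =>
    intro cs hlen
    cases cs with
    | nil =>
      constructor
      · intro names buf
        simp [aLoop_nil, finB]
      · intro acc names
        simp [aInner, finB]
    | cons c rest =>
      have hr : rest.length ≤ n := by simp at hlen; omega
      constructor
      · intro names buf
        by_cases hc : c = '{'
        · subst hc
          cases rest with
          | nil => simp [aLoop_open_nil, bStep, finB]
          | cons c2 rest2 =>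
            have hr2 : rest2.length ≤ n := by simp at hlen; omega
            by_cases hc2 : c2 = '{'
            · subst hc2
              rw [aLoop_esc, (ih rest2 hr2).1 names buf]
              simp [bStep]
            · rw [aLoop_open c2 rest2 names hc2]
              by_cases h2 : c2 = '}'
              · subst h2
                simp only [aInner, if_true, List.nil_append]
                rw [(ih rest2 hr2).1 (names ++ [String.ofList []]) buf]
                simp [bStep, ofList_snoc, hc2]
              · simp only [aInner, if_neg h2, List.nil_append]
                rw [(ih rest2 hr2).2 [c2] names]
                simp [bStep, hc2, h2]
        · rw [aLoop_other c rest names hc, (ih rest hr).1 names buf]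
          simp [bStep, hc]
      · intro acc names
        by_cases hc : c = '}'
        · subst hc
          simp only [aInner, if_true]
          rw [(ih rest hr).1 (names ++ [String.ofList acc]) acc]
          simp [bStep, ofList_snoc]
        · simp only [aInner, if_neg hc]
          rw [(ih rest hr).2 (acc ++ [c]) names]
          simp [bStep, hc]

theorem get_argnames_spec : Claim_equal_get_argnames := by
  intro text _ _
  unfold Spec_get_argnames get_argnames get_argnames_alt
  have h := (main_inv text.toList.length text.toList le_rfl).1 [] []
  simpa [finB, PySem.Set.ofList, PySem.Set.empty] using h
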